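-- pv_equiv track=rewrite | github.com/tsubame-misa/dorakue | graphDrawing/havel-hakimi_pori2.py | get_edge_patern
-- ===== SOURCE A (Python) =====
-- import collections
-- import itertools
--
-- def get_edge_patern(graph,  degrees, rm_node):
--     koho = []
--     for d in degrees:
--         k = [node for node, edges in graph if edges == d and node!=rm_node]
--         koho.append(k)
--     koho_combination = list(itertools.product(*koho))
--     add_edge_nodes = []
--     for k in koho_combination:
--         c = collections.Counter(k).most_common()[0][1]
--         if c==1:
--             add_edge_nodes.append(list(k))
--     return add_edge_nodes
-- ===== SOURCE B (Python) =====
-- def get_edge_patern(graph, degrees, rm_node):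
--     # Backtracking: pick one node per degree, skipping nodes already chosen,
--     # so only distinct partial selections are ever extended (same order as the
--     # filtered product).
--     out = []
--     sel = []
--
--     def dfs(i):
--         if i == len(degrees):
--             out.append(sel.copy())
--             return
--         d = degrees[i]
--         for node, edges in graph:
--             if edges == d and node != rm_node and node not in sel:
--                 sel.append(node)
--                 dfs(i + 1)
--                 sel.pop()
--
--     dfs(0)
--     return out
-- ===== Notes on version B (the rewrite author's own statement) =====
-- stated objective: faster
-- what changed: A materialises the full cartesian product of the candidate lists and then filters tuples whose Counter maximum is 1; B does DFS/backtracking, extending only selections whose nodes are still all distinct, producing the same lists in the same order without ever building the product.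
import Mathlib
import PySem

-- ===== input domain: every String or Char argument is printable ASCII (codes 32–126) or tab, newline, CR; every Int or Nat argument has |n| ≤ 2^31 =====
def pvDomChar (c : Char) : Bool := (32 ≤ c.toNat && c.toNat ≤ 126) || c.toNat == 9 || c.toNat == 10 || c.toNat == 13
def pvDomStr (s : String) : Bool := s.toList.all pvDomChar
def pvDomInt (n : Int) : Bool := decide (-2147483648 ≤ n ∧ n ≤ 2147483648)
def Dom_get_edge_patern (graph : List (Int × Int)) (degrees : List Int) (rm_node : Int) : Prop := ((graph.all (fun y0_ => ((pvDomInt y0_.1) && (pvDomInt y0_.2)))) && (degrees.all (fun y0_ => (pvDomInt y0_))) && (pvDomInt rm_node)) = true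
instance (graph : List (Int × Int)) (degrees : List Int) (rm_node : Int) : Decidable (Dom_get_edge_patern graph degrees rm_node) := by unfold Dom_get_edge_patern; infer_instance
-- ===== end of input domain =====

-- B replaces A's full cartesian product + Counter filter by DFS/backtracking over
-- still-distinct selections (faster: only valid partial selections are ever extended).

-- ===== PORT A =====
-- itertools.product(*koho): rightmost factor varies fastest
def pvProduct : List (List Int) → List (List Int)
  | [] => [[]]
  | l :: ls => l.flatMap (fun x => (pvProduct ls).map (x :: ·))

-- collections.Counter(k).most_common()[0][1]; Python raises IndexError on k = []
-- (most_common is sorted(items, key=count, reverse=True)); the [] branch returns 0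
-- only where Python raises, which Pre_ excludes.
def pvTopCount (k : List Int) : Int :=
  match PySem.List.sorted (PySem.Dict.counter k).items (fun p => p.2) true with
  | [] => 0
  | p :: _ => p.2

def get_edge_patern (graph : List (Int × Int)) (degrees : List Int) (rm_node : Int) : List (List Int) :=
  let koho := degrees.foldl (fun acc d =>
    acc ++ [(graph.filter (fun p => p.2 == d && p.1 != rm_node)).map (·.1)]) []
  let koho_combination := pvProduct koho
  koho_combination.foldl (fun acc k => if pvTopCount k == 1 then acc ++ [k] else acc) []

-- ===== PORT B =====
def pvDfs (graph : List (Int × Int)) (rm_node : Int) : List Int → List Int → List (List Int)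
  | [], sel => [sel]
  | d :: ds, sel =>
      graph.flatMap (fun p =>
        if p.2 == d && p.1 != rm_node && !(sel.contains p.1) then
          pvDfs graph rm_node ds (sel ++ [p.1])
        else [])

def get_edge_patern_alt (graph : List (Int × Int)) (degrees : List Int) (rm_node : Int) : List (List Int) :=
  pvDfs graph rm_node degrees []

-- ===== PRECONDITION & SPEC =====
-- Pre_ excludes only degrees = [], where Python A raises IndexError
-- (most_common()[0] of an empty Counter).
def Pre_get_edge_patern (graph : List (Int × Int)) (degrees : List Int) (rm_node : Int) : Prop := degrees ≠ []
instance (graph : List (Int × Int)) (degrees : List Int) (rm_node : Int) : Decidable (Pre_get_edge_patern graph degrees rm_node) := by unfold Pre_get_edge_patern; infer_instance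
def pvWitness_get_edge_patern : (List (Int × Int)) × List Int × Int := ([(1, 2), (2, 2)], [2, 2], 0)

def Spec_get_edge_patern (graph : List (Int × Int)) (degrees : List Int) (rm_node : Int) (out : List (List Int)) : Prop := out = get_edge_patern_alt graph degrees rm_node
instance (graph : List (Int × Int)) (degrees : List Int) (rm_node : Int) (out : List (List Int)) : Decidable (Spec_get_edge_patern graph degrees rm_node out) := by unfold Spec_get_edge_patern; infer_instance

-- ===== CLAIM (what is proved, stated in full; the proofs are below) =====
def Claim_equal_get_edge_patern : Prop := ∀ (graph : List (Int × Int)) (degrees : List Int) (rm_node : Int), Dom_get_edge_patern graph degrees rm_node → Pre_get_edge_patern graph degrees rm_node → Spec_get_edge_patern graph degrees rm_node (get_edge_patern graph degrees rm_node)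
-- ===== LEMMAS AND PROOFS =====

-- the candidate list for one degree
def pvKoho (graph : List (Int × Int)) (rm_node : Int) (d : Int) : List Int :=
  (graph.filter (fun p => p.2 == d && p.1 != rm_node)).map (·.1)

-- For a nonempty tuple, the top count of Counter(k).most_common() is 1 iff k has no duplicates.
theorem pvTopCount_eq_one_iff (k : List Int) (hk : k ≠ []) : pvTopCount k = 1 ↔ k.Nodup := by
  have hitems : (PySem.Dict.counter k).items
      = (PySem.Set.ofList k).map (fun v => (v, (k.count v : Int))) := PySem.Dict.items_counter k
  have hne : PySem.List.sorted (PySem.Dict.counter k).items (fun p => p.2) true ≠ [] := by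
    intro h0
    have hlen := PySem.List.length_sorted (PySem.Dict.counter k).items (fun p => p.2) true
    rw [h0, hitems] at hlen
    obtain ⟨a, t, rfl⟩ := List.exists_cons_of_ne_nil hk
    have ha : a ∈ PySem.Set.ofList (a :: t) := (PySem.Set.mem_ofList _ a).mpr List.mem_cons_self
    have := List.length_pos_of_mem ha
    simp at hlen
    omega
  obtain ⟨p, t, hpt⟩ := List.exists_cons_of_ne_nil hne
  have hval : pvTopCount k = p.2 := by unfold pvTopCount; rw [hpt]
  have hmem : p ∈ (PySem.Dict.counter k).items :=
    (PySem.List.mem_sorted _ _ _ p).mp (hpt ▸ List.mem_cons_self)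
  rw [hitems] at hmem
  obtain ⟨v, hv, rfl⟩ := List.mem_map.mp hmem
  have hvk : v ∈ k := (PySem.Set.mem_ofList k v).mp hv
  have hmax : ∀ y ∈ (PySem.Dict.counter k).items, y.2 ≤ (k.count v : Int) :=
    fun y hy => PySem.List.key_head_sorted_rev_ge _ (fun p => p.2) hpt y hy
  rw [hval]
  constructor
  · intro h1
    rw [List.nodup_iff_count]
    intro a
    by_cases ha : a ∈ k
    · have hmem2 : (a, (k.count a : Int)) ∈ (PySem.Dict.counter k).items := by
        rw [hitems]
        exact List.mem_map.mpr ⟨a, (PySem.Set.mem_ofList k a).mpr ha, rfl⟩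
      have := hmax _ hmem2
      simp only at this h1
      omega
    · simp [List.count_eq_zero_of_not_mem ha]
  · intro hnd
    simp only
    exact_mod_cast List.count_eq_one_of_mem hnd hvk

-- a guarded loop over graph is a loop over the filtered list
theorem pvFlatMap_filter (l : List (Int × Int)) (c : Int × Int → Bool) (g : Int × Int → List (List Int)) :
    l.flatMap (fun p => if c p then g p else []) = (l.filter c).flatMap g := by
  induction l with
  | nil => rfl
  | cons h t ih => by_cases hc : c h <;> simp [hc, ih]

-- B's DFS enumerates exactly the distinct tuples of the product, in product order.
theorem pvDfs_eq (graph : List (Int × Int)) (rm_node : Int) (ds : List Int) (sel : List Int)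
    (hsel : sel.Nodup) :
    pvDfs graph rm_node ds sel =
      ((pvProduct (ds.map (pvKoho graph rm_node))).filter (fun k => decide (sel ++ k).Nodup)).map (sel ++ ·) := by
  induction ds generalizing sel with
  | nil => simp [pvDfs, pvProduct, hsel]
  | cons d ds ih =>
    simp only [pvDfs, List.map_cons, pvProduct]
    rw [List.filter_flatMap, List.map_flatMap]
    have hstep : ∀ p : Int × Int,
        (if p.2 == d && p.1 != rm_node && !(sel.contains p.1) then
            pvDfs graph rm_node ds (sel ++ [p.1]) else [])
        = (if p.2 == d && p.1 != rm_node then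
            (if !(sel.contains p.1) then pvDfs graph rm_node ds (sel ++ [p.1]) else []) else []) := by
      intro p
      by_cases h1 : (p.2 == d && p.1 != rm_node) = true <;> simp [h1]
    simp only [hstep]
    rw [pvFlatMap_filter]
    have hk : pvKoho graph rm_node d
        = (graph.filter (fun p => p.2 == d && p.1 != rm_node)).map (·.1) := rfl
    rw [hk, List.flatMap_map]
    congr 1
    funext x
    rw [List.filter_map]
    by_cases hx : x.1 ∈ sel
    · have hall : ∀ a ∈ pvProduct (ds.map (pvKoho graph rm_node)),
          ¬ ((fun k => decide (sel ++ k).Nodup) ∘ (x.1 :: ·)) a = true := by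
        intro a _
        simp only [Function.comp, decide_eq_true_eq]
        intro hnd
        exact (List.disjoint_of_nodup_append hnd) hx List.mem_cons_self
      rw [List.filter_eq_nil_iff.mpr hall]
      simp [hx]
    · have hsel2 : (sel ++ [x.1]).Nodup := by
        simp [List.nodup_append, hsel]
        exact fun a ha h => hx (h ▸ ha)
      rw [if_pos (by simp [hx]), ih _ hsel2, List.map_map]
      have e1 : ((fun k => sel ++ k) ∘ (fun k => x.1 :: k)) = (fun k => (sel ++ [x.1]) ++ k) := by
        funext k; simp
      have e2 : ((fun k => decide (sel ++ k).Nodup) ∘ (fun k => x.1 :: k))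
          = (fun k => decide ((sel ++ [x.1]) ++ k).Nodup) := by
        funext k; simp
      rw [e1, e2]

-- every tuple of the product has one entry per factor
theorem pvProduct_length (ls : List (List Int)) (k : List Int) (hk : k ∈ pvProduct ls) :
    k.length = ls.length := by
  induction ls generalizing k with
  | nil => simp [pvProduct] at hk; simp [hk]
  | cons l ls ih =>
    simp only [pvProduct, List.mem_flatMap, List.mem_map] at hk
    obtain ⟨x, _, k', hk', rfl⟩ := hk
    simp [ih k' hk']

-- ===== VERDICT (by name: the statement is the Claim_ definition above) =====
theorem get_edge_patern_spec : Claim_equal_get_edge_patern := by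
  intro graph degrees rm_node _ hpre
  unfold Spec_get_edge_patern get_edge_patern get_edge_patern_alt
  rw [pvDfs_eq graph rm_node degrees [] List.nodup_nil]
  simp only [List.nil_append]
  rw [PySem.List.foldl_append_singleton_eq_map (fun d => (graph.filter (fun p => p.2 == d && p.1 != rm_node)).map (·.1)) degrees []]
  rw [PySem.List.foldl_append_if (fun k => pvTopCount k == 1) (fun k => k) (pvProduct ([] ++ degrees.map fun d => (graph.filter (fun p => p.2 == d && p.1 != rm_node)).map (·.1))) []]
  simp only [List.nil_append, List.map_id_fun', id]
  have hmap : (degrees.map fun d => (graph.filter (fun p => p.2 == d && p.1 != rm_node)).map (·.1))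
      = degrees.map (pvKoho graph rm_node) := rfl
  rw [hmap]
  apply List.filter_congr
  intro k hkmem
  have hlen := pvProduct_length _ k hkmem
  have hkne : k ≠ [] := by
    intro h0
    subst h0
    simp at hlen
    exact hpre (List.length_eq_zero_iff.mp hlen.symm)
  rw [Bool.eq_iff_iff]
  simp only [beq_iff_eq, decide_eq_true_eq]
  exact pvTopCount_eq_one_iff k hkne
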